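-- pv_equiv track=rewrite | github.com/Micjoey/WeddingTableMatch | generate_assignment_mind_map.py | _perimeter_grid_layout
-- ===== SOURCE A (Python) =====
-- from typing import Dict, List, Tuple, Iterable
--
-- def _perimeter_grid_layout(cx: int, cy: int, n: int, rows: int, cols: int) -> List[Tuple[int, int]]:
--     """
--     Place seats around the perimeter of a rows x cols rectangle.
--     If more seats than perimeter, start an inner rectangle.
--     """
--     # Base rectangle size
--     cell = 28
--     w = cols * cell
--     h = rows * cell
--
--     def rect_points(cx, cy, w, h):
--         left = cx - w // 2
--         right = cx + w // 2
--         top = cy - h // 2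
--         bottom = cy + h // 2
--         pts = []
--         # Top edge
--         for c in range(cols):
--             pts.append((left + c * cell + cell // 2, top))
--         # Right edge
--         for r in range(1, rows):
--             pts.append((right, top + r * cell))
--         # Bottom edge
--         for c in range(cols - 1, -1, -1):
--             pts.append((left + c * cell + cell // 2, bottom))
--         # Left edge
--         for r in range(rows - 1, 0, -1):
--             pts.append((left, top + r * cell))
--         return pts
--
--     coords: List[Tuple[int, int]] = []
--     current_w, current_h = w, h
--     while len(coords) < n:
--         perimeter_pts = rect_points(cx, cy, current_w, current_h)
--         for p in perimeter_pts:
--             if len(coords) >= n: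
--                 break
--             coords.append(p)
--         # Shrink for inner ring
--         current_w -= 2 * cell
--         current_h -= 2 * cell
--         if current_w <= cell or current_h <= cell:
--             break
--
--     # If still short, fill inside grid
--     while len(coords) < n:
--         coords.append((cx, cy))
--     return coords
-- ===== SOURCE B (Python) =====
-- def _perimeter_grid_layout(cx, cy, n, rows, cols):
--     """Closed-form index arithmetic: seat i's coordinate is computed directly
--     from its ring number i // P and offset i % P; no ring-by-ring generation."""
--     cell = 28
--     w, h = cols * cell, rows * cell
--     top_cnt = max(cols, 0)          # points on the top (and bottom) edge
--     side_cnt = max(rows - 1, 0)     # points on the right (and left) edge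
--     per_ring = 2 * top_cnt + 2 * side_cnt
--     # number of rings the shrink loop produces before the box gets too small
--     n_rings = max(1, (min(w, h) + cell - 1) // (2 * cell))
--
--     def point(i):
--         if per_ring == 0 or i >= n_rings * per_ring:
--             return (cx, cy)
--         k, pos = divmod(i, per_ring)
--         cw, ch = w - 2 * cell * k, h - 2 * cell * k
--         left, top = cx - cw // 2, cy - ch // 2
--         if pos < top_cnt:
--             return (left + pos * cell + cell // 2, top)
--         pos -= top_cnt
--         if pos < side_cnt:
--             return (cx + cw // 2, top + (pos + 1) * cell)
--         pos -= side_cnt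
--         if pos < top_cnt:
--             return (left + (cols - 1 - pos) * cell + cell // 2, cy + ch // 2)
--         pos -= top_cnt
--         return (left, top + (rows - 1 - pos) * cell)
--
--     return [point(i) for i in range(max(n, 0))]
-- ===== Notes on version B (the rewrite author's own statement) =====
-- stated objective: faster
-- what changed: Replaced A's sequential generation (a while-loop that materialises each shrinking ring edge by edge, appending with per-point break checks, then a pad loop) by closed-form index arithmetic: the number of rings and the per-ring point count are computed up front, and seat i's coordinate is obtained directly from divmod(i, per_ring), so no ring lists are ever built and nothing past the n-th point is computed.
import Mathlib
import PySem

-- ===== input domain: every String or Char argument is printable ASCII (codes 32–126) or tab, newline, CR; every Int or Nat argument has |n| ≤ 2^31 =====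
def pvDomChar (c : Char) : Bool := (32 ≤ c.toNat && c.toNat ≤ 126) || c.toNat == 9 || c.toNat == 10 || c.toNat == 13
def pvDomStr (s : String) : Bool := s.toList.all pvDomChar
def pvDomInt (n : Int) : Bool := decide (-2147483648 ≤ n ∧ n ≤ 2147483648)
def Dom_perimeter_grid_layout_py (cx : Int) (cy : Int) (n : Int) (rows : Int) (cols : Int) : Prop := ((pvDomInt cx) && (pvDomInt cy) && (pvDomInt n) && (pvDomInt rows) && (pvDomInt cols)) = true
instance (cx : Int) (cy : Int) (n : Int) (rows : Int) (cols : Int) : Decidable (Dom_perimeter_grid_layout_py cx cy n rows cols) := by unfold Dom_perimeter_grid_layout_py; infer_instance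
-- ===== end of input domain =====

-- B replaces A's sequential ring-by-ring generation (while-loop with per-point break
-- checks, then a pad loop) by closed-form index arithmetic: seat i's coordinate comes
-- directly from divmod(i, per_ring); no ring list is ever materialised.

-- ===== PORT A =====
-- A's nested helper rect_points (cell = 28 is the function's constant; each Python
-- for-loop appending to pts is a foldl over the same range appending a singleton).
-- (each 'pts.append(..)' is an Array.push — the O(1) model of appending at the end)
def pvRectPointsA (cx cy w h rows cols : Int) : List (Int × Int) :=
  let left := cx - PySem.Int.floordiv w 2
  let right := cx + PySem.Int.floordiv w 2
  let top := cy - PySem.Int.floordiv h 2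
  let bottom := cy + PySem.Int.floordiv h 2
  let pts : Array (Int × Int) := #[]
  let pts := (PySem.List.pyRange 0 cols 1).foldl
    (fun acc c => acc.push (left + c * 28 + PySem.Int.floordiv 28 2, top)) pts
  let pts := (PySem.List.pyRange 1 rows 1).foldl
    (fun acc r => acc.push (right, top + r * 28)) pts
  let pts := (PySem.List.pyRange (cols - 1) (-1) (-1)).foldl
    (fun acc c => acc.push (left + c * 28 + PySem.Int.floordiv 28 2, bottom)) pts
  let pts := (PySem.List.pyRange (rows - 1) 0 (-1)).foldl
    (fun acc r => acc.push (left, top + r * 28)) pts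
  pts.toList

-- 'for p in perimeter_pts: if len(coords) >= n: break; coords.append(p)'
def pvTakeIntoA (n : Int) : Array (Int × Int) → List (Int × Int) → Array (Int × Int)
  | coords, [] => coords
  | coords, p :: ps =>
    if (coords.size : Int) ≥ n then coords
    else pvTakeIntoA n (coords.push p) ps

-- the outer 'while len(coords) < n' ring loop with its shrink-and-break tail;
-- the Nat argument is pure fuel (one unit per iteration, the wrapper below passes
-- enough for the loop, which shrinks cw by 56 per round and stops at cw ≤ 28)
def pvRingLoopAF (cx cy n rows cols : Int) :
    Nat → Array (Int × Int) → Int → Int → Array (Int × Int)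
  | 0, coords, _, _ => coords
  | f + 1, coords, cw, ch =>
    if (coords.size : Int) < n then
      let coords' := pvTakeIntoA n coords (pvRectPointsA cx cy cw ch rows cols)
      let cw' := cw - 2 * 28
      let ch' := ch - 2 * 28
      if cw' ≤ 28 ∨ ch' ≤ 28 then coords'
      else pvRingLoopAF cx cy n rows cols f coords' cw' ch'
    else coords

def pvRingLoopA (cx cy n rows cols : Int) (coords : Array (Int × Int)) (cw ch : Int) :
    Array (Int × Int) :=
  pvRingLoopAF cx cy n rows cols (cw.toNat / 56 + 1) coords cw ch

-- the final 'while len(coords) < n: coords.append((cx, cy))' (fuel n.toNat suffices)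
def pvFillAF (cx cy n : Int) : Nat → Array (Int × Int) → Array (Int × Int)
  | 0, coords => coords
  | f + 1, coords =>
    if (coords.size : Int) < n then pvFillAF cx cy n f (coords.push (cx, cy))
    else coords

def pvFillA (cx cy n : Int) (coords : Array (Int × Int)) : Array (Int × Int) :=
  pvFillAF cx cy n n.toNat coords

def perimeter_grid_layout_py (cx : Int) (cy : Int) (n : Int) (rows : Int) (cols : Int) : List (Int × Int) :=
  let w := cols * 28
  let h := rows * 28
  (pvFillA cx cy n (pvRingLoopA cx cy n rows cols #[] w h)).toList

-- ===== PORT B =====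
-- Source B's nested closure point(i): the captured variables are explicit parameters
def pvPointB (cx cy rows cols w h top_cnt side_cnt per_ring n_rings : Int)
    (i : Int) : Int × Int :=
  if per_ring = 0 ∨ i ≥ n_rings * per_ring then (cx, cy)
  else
    let k := PySem.Int.floordiv i per_ring
    let pos := PySem.Int.mod i per_ring
    let cw := w - 2 * 28 * k
    let ch := h - 2 * 28 * k
    let left := cx - PySem.Int.floordiv cw 2
    let top := cy - PySem.Int.floordiv ch 2
    if pos < top_cnt then (left + pos * 28 + PySem.Int.floordiv 28 2, top)
    else
      let pos := pos - top_cnt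
      if pos < side_cnt then (cx + PySem.Int.floordiv cw 2, top + (pos + 1) * 28)
      else
        let pos := pos - side_cnt
        if pos < top_cnt then
          (cx - PySem.Int.floordiv cw 2 + (cols - 1 - pos) * 28 + PySem.Int.floordiv 28 2,
           cy + PySem.Int.floordiv ch 2)
        else
          let pos := pos - top_cnt
          (left, top + (rows - 1 - pos) * 28)

def perimeter_grid_layout_py_alt (cx : Int) (cy : Int) (n : Int) (rows : Int) (cols : Int) : List (Int × Int) :=
  let w := cols * 28
  let h := rows * 28
  let top_cnt := max cols 0
  let side_cnt := max (rows - 1) 0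
  let per_ring := 2 * top_cnt + 2 * side_cnt
  let n_rings := max 1 (PySem.Int.floordiv (min w h + 28 - 1) (2 * 28))
  (PySem.List.pyRange 0 (max n 0) 1).map
    (pvPointB cx cy rows cols w h top_cnt side_cnt per_ring n_rings)

-- ===== PRECONDITION & SPEC =====
def Spec_perimeter_grid_layout_py (cx : Int) (cy : Int) (n : Int) (rows : Int) (cols : Int) (out : List (Int × Int)) : Prop := out = perimeter_grid_layout_py_alt cx cy n rows cols
instance (cx : Int) (cy : Int) (n : Int) (rows : Int) (cols : Int) (out : List (Int × Int)) : Decidable (Spec_perimeter_grid_layout_py cx cy n rows cols out) := by unfold Spec_perimeter_grid_layout_py; infer_instance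

-- ===== CLAIM (what is proved, stated in full; the proofs are below) =====
def Claim_equal_perimeter_grid_layout_py : Prop := ∀ (cx : Int) (cy : Int) (n : Int) (rows : Int) (cols : Int), Dom_perimeter_grid_layout_py cx cy n rows cols → Spec_perimeter_grid_layout_py cx cy n rows cols (perimeter_grid_layout_py cx cy n rows cols)

-- ===== LEMMAS AND PROOFS =====

-- proof-side view of one ring of A as four concatenated maps
def pvRingS (cx cy rows cols cw ch : Int) : List (Int × Int) :=
  let left := cx - PySem.Int.floordiv cw 2
  let right := cx + PySem.Int.floordiv cw 2
  let top := cy - PySem.Int.floordiv ch 2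
  let bottom := cy + PySem.Int.floordiv ch 2
  ((PySem.List.pyRange 0 cols 1).map fun c => (left + c * 28 + PySem.Int.floordiv 28 2, top))
    ++ ((PySem.List.pyRange 1 rows 1).map fun r => (right, top + r * 28))
    ++ ((PySem.List.pyRange (cols - 1) (-1) (-1)).map fun c => (left + c * 28 + PySem.Int.floordiv 28 2, bottom))
    ++ ((PySem.List.pyRange (rows - 1) 0 (-1)).map fun r => (left, top + r * 28))

-- proof-side view of A's whole ring phase as a finite stream (same fuel discipline)
def pvRingsSF (cx cy rows cols : Int) : Nat → Int → Int → List (Int × Int)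
  | 0, _, _ => []
  | f + 1, cw, ch =>
    pvRingS cx cy rows cols cw ch ++
      (if cw - 2 * 28 ≤ 28 ∨ ch - 2 * 28 ≤ 28 then []
       else pvRingsSF cx cy rows cols f (cw - 2 * 28) (ch - 2 * 28))

def pvRingsS (cx cy rows cols cw ch : Int) : List (Int × Int) :=
  pvRingsSF cx cy rows cols (cw.toNat / 56 + 1) cw ch

-- the ring counts, proof side
def pvC (cols : Int) : Nat := cols.toNat
def pvRm (rows : Int) : Nat := (rows - 1).toNat
def pvP (rows cols : Int) : Nat := pvC cols + pvRm rows + pvC cols + pvRm rows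
def pvM (cw ch : Int) : Nat := (max 1 (PySem.Int.floordiv (min cw ch + 27) 56)).toNat

-- the j-th point of the ring at box (cw, ch), closed form
def pvRingFun (cx cy rows cols cw ch : Int) (j : Nat) : Int × Int :=
  let left := cx - PySem.Int.floordiv cw 2
  let top := cy - PySem.Int.floordiv ch 2
  if j < pvC cols then (left + (j : Int) * 28 + PySem.Int.floordiv 28 2, top)
  else if j < pvC cols + pvRm rows then
    (cx + PySem.Int.floordiv cw 2, top + ((j : Int) - pvC cols + 1) * 28)
  else if j < pvC cols + pvRm rows + pvC cols then
    (left + (cols - 1 - ((j : Int) - pvC cols - pvRm rows)) * 28 + PySem.Int.floordiv 28 2,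
     cy + PySem.Int.floordiv ch 2)
  else (left, cy - PySem.Int.floordiv ch 2 + (rows - 1 - ((j : Int) - pvC cols - pvRm rows - pvC cols)) * 28)

-- A's rect_points is the ringS list
theorem rect_eq_ringS (cx cy w h rows cols : Int) :
    pvRectPointsA cx cy w h rows cols = pvRingS cx cy rows cols w h := by
  simp only [pvRectPointsA, pvRingS]
  rw [Array.foldl_toList_eq_map, Array.foldl_toList_eq_map, Array.foldl_toList_eq_map,
    Array.foldl_toList_eq_map]
  simp

theorem take_take_append {α : Type} (k : Nat) (xs ys : List α) :
    (xs.take k ++ ys).take k = (xs ++ ys).take k := by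
  simp only [List.take_append, List.take_take, List.length_take]
  have : k - min k xs.length = k - xs.length := by omega
  rw [this]
  simp

-- the per-point break loop is a truncation of the whole stream
theorem takeInto_eq_take (n : Int) (coords : Array (Int × Int)) (ps : List (Int × Int))
    (h : (coords.size : Int) ≤ n) :
    (pvTakeIntoA n coords ps).toList = (coords.toList ++ ps).take n.toNat := by
  induction ps generalizing coords with
  | nil =>
    rw [pvTakeIntoA]
    simp [List.take_of_length_le (by simp [Array.length_toList]; omega :
      coords.toList.length ≤ n.toNat)]
  | cons p ps ih =>
    rw [pvTakeIntoA]
    by_cases hge : (coords.size : Int) ≥ n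
    · have hlen : coords.toList.length = n.toNat := by simp [Array.length_toList]; omega
      rw [if_pos hge, ← hlen, List.take_append_of_le_length (by omega),
        List.take_of_length_le (by omega)]
    · rw [if_neg hge, ih (coords.push p) (by simp [Array.size_push]; omega)]
      simp

-- with the same (sufficient) fuel on both sides, the ring while-loop is a
-- truncation of the concatenated ring stream
theorem ringLoopF_eq_take (cx cy n rows cols : Int) (f : Nat) :
    ∀ (coords : Array (Int × Int)) (cw ch : Int),
      cw ≤ 28 + 56 * (f : Int) → 1 ≤ f → (coords.size : Int) ≤ n →
      (pvRingLoopAF cx cy n rows cols f coords cw ch).toList =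
        (coords.toList ++ pvRingsSF cx cy rows cols f cw ch).take n.toNat := by
  induction f with
  | zero => intro _ _ _ _ hf; omega
  | succ f ih =>
    intro coords cw ch hcw _ h
    rw [pvRingLoopAF, pvRingsSF]
    by_cases hlt : (coords.size : Int) < n
    · rw [if_pos hlt]
      have htk := takeInto_eq_take n coords (pvRectPointsA cx cy cw ch rows cols) h
      have hsz : ((pvTakeIntoA n coords (pvRectPointsA cx cy cw ch rows cols)).size : Int)
          ≤ n := by
        have := congrArg List.length htk
        simp only [Array.length_toList, List.length_take] at this
        omega
      by_cases hbr : cw - 2 * 28 ≤ 28 ∨ ch - 2 * 28 ≤ 28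
      · rw [if_pos hbr, if_pos hbr, htk, rect_eq_ringS]
        simp
      · rw [if_neg hbr, if_neg hbr]
        rw [ih _ (cw - 2 * 28) (ch - 2 * 28) (by push_cast; omega) (by omega) hsz]
        rw [htk, rect_eq_ringS, ← List.append_assoc, take_take_append]
    · rw [if_neg hlt]
      have hlen : coords.toList.length = n.toNat := by simp [Array.length_toList]; omega
      rw [List.take_append_of_le_length (by omega), List.take_of_length_le (by omega)]

theorem ringLoop_eq_take (cx cy n rows cols : Int) (coords : Array (Int × Int)) (cw ch : Int)
    (h : (coords.size : Int) ≤ n) :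
    (pvRingLoopA cx cy n rows cols coords cw ch).toList =
      (coords.toList ++ pvRingsS cx cy rows cols cw ch).take n.toNat := by
  rw [pvRingLoopA, pvRingsS]
  exact ringLoopF_eq_take cx cy n rows cols (cw.toNat / 56 + 1) coords cw ch
    (by push_cast; omega) (by omega) h

-- the fill while-loop pads with the centre up to length n
theorem fillAF_eq_pad (cx cy n : Int) (f : Nat) :
    ∀ (coords : Array (Int × Int)), n - (coords.size : Int) ≤ (f : Int) →
    (pvFillAF cx cy n f coords).toList =
      coords.toList ++ List.replicate (n.toNat - coords.size) (cx, cy) := by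
  induction f with
  | zero =>
    intro coords hf
    have : n.toNat - coords.size = 0 := by omega
    simp [pvFillAF, this]
  | succ f ih =>
    intro coords hf
    rw [pvFillAF]
    by_cases hlt : (coords.size : Int) < n
    · rw [if_pos hlt, ih _ (by simp [Array.size_push]; omega)]
      have : n.toNat - coords.size = (n.toNat - (coords.size + 1)) + 1 := by omega
      simp [this, List.replicate_succ, Array.toList_push, Array.size_push]
    · rw [if_neg hlt]
      have : n.toNat - coords.size = 0 := by omega
      simp [this]

theorem fillA_eq_pad (cx cy n : Int) (coords : Array (Int × Int)) :
    (pvFillA cx cy n coords).toList =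
      coords.toList ++ List.replicate (n.toNat - coords.size) (cx, cy) := by
  rw [pvFillA]
  exact fillAF_eq_pad cx cy n n.toNat coords (by omega)

-- splitting a mapped range at a point
theorem range_map_split {alpha : Type} (n m : Nat) (g : Nat → alpha) :
    (List.range (n + m)).map g
      = (List.range n).map g ++ (List.range m).map (fun k => g (n + k)) := by
  rw [List.range_add]; simp [Function.comp]

-- one ring as a map over range of its closed-form point function
theorem ringS_eq_map (cx cy rows cols cw ch : Int) :
    pvRingS cx cy rows cols cw ch =
      (List.range (pvP rows cols)).map (pvRingFun cx cy rows cols cw ch) := by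
  have h1 : (PySem.List.pyRange 0 cols 1).map
      (fun c => (cx - PySem.Int.floordiv cw 2 + c * 28 + PySem.Int.floordiv 28 2,
        cy - PySem.Int.floordiv ch 2)) =
      (List.range (pvC cols)).map (pvRingFun cx cy rows cols cw ch) := by
    rw [PySem.List.pyRange_one, List.map_map]
    have : (cols - 0).toNat = pvC cols := by simp [pvC]
    rw [this]
    apply List.map_congr_left
    intro k hk
    simp only [List.mem_range] at hk
    simp only [Function.comp, pvRingFun, pvC, pvRm]
    rw [if_pos (by simp [pvC] at *; omega)]
    norm_num
  have h2 : (PySem.List.pyRange 1 rows 1).map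
      (fun r => (cx + PySem.Int.floordiv cw 2, cy - PySem.Int.floordiv ch 2 + r * 28)) =
      (List.range (pvRm rows)).map (fun k => pvRingFun cx cy rows cols cw ch (pvC cols + k)) := by
    rw [PySem.List.pyRange_one, List.map_map]
    have : (rows - 1).toNat = pvRm rows := by simp [pvRm]
    rw [this]
    apply List.map_congr_left
    intro k hk
    simp only [List.mem_range, pvRm] at hk
    simp only [Function.comp, pvRingFun, pvC, pvRm]
    rw [if_neg (by omega), if_pos (by omega)]
    congr 1
    push_cast
    ring
  have h3 : (PySem.List.pyRange (cols - 1) (-1) (-1)).map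
      (fun c => (cx - PySem.Int.floordiv cw 2 + c * 28 + PySem.Int.floordiv 28 2,
        cy + PySem.Int.floordiv ch 2)) =
      (List.range (pvC cols)).map
        (fun k => pvRingFun cx cy rows cols cw ch (pvC cols + pvRm rows + k)) := by
    rw [PySem.List.pyRange_neg_one, List.map_map]
    have : (cols - 1 - (-1)).toNat = pvC cols := by unfold pvC; omega
    rw [this]
    apply List.map_congr_left
    intro k hk
    simp only [List.mem_range, pvC] at hk
    simp only [Function.comp, pvRingFun, pvC, pvRm]
    rw [if_neg (by omega), if_neg (by omega), if_pos (by omega)]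
    congr 1
    push_cast
    ring
  have h4 : (PySem.List.pyRange (rows - 1) 0 (-1)).map
      (fun r => (cx - PySem.Int.floordiv cw 2, cy - PySem.Int.floordiv ch 2 + r * 28)) =
      (List.range (pvRm rows)).map
        (fun k => pvRingFun cx cy rows cols cw ch (pvC cols + pvRm rows + pvC cols + k)) := by
    rw [PySem.List.pyRange_neg_one, List.map_map]
    have : (rows - 1 - 0).toNat = pvRm rows := by simp [pvRm]
    rw [this]
    apply List.map_congr_left
    intro k hk
    simp only [List.mem_range, pvRm] at hk
    simp only [Function.comp, pvRingFun, pvC, pvRm]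
    rw [if_neg (by omega), if_neg (by omega), if_neg (by omega)]
    congr 1
    push_cast
    ring
  simp only [pvP]
  rw [range_map_split, range_map_split, range_map_split]
  simp only [pvRingS]
  rw [h1, h2, h3, h4]

-- the ring stream as a flatMap over ring indices
theorem ringsSF_eq_flatMap (cx cy rows cols : Int) (f : Nat) :
    ∀ (cw ch : Int), cw ≤ 28 + 56 * (f : Int) → 1 ≤ f →
      pvRingsSF cx cy rows cols f cw ch =
        (List.range (pvM cw ch)).flatMap
          (fun (k : Nat) =>
            pvRingS cx cy rows cols (cw - 56 * (k : Int)) (ch - 56 * (k : Int))) := by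
  induction f with
  | zero => intro _ _ _ hf; omega
  | succ f ih =>
    intro cw ch hcw _
    rw [pvRingsSF]
    by_cases hbr : cw - 2 * 28 ≤ 28 ∨ ch - 2 * 28 ≤ 28
    · have hM : pvM cw ch = 1 := by
        unfold pvM
        rw [PySem.Int.floordiv_eq_ediv_of_pos (by norm_num)]
        omega
      rw [if_pos hbr, hM]
      simp
    · have hM : pvM cw ch = pvM (cw - 2 * 28) (ch - 2 * 28) + 1 := by
        unfold pvM
        rw [PySem.Int.floordiv_eq_ediv_of_pos (by norm_num),
          PySem.Int.floordiv_eq_ediv_of_pos (by norm_num)]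
        omega
      rw [if_neg hbr, hM, List.range_succ_eq_map, List.flatMap_cons, List.flatMap_map]
      rw [ih (cw - 2 * 28) (ch - 2 * 28) (by push_cast; omega) (by omega)]
      congr 1
      · norm_num
      · apply List.flatMap_congr
        intro k hk
        have h1 : cw - 56 * ((Nat.succ k : Nat) : Int) = cw - 2 * 28 - 56 * (k : Int) := by
          push_cast; ring
        have h2 : ch - 56 * ((Nat.succ k : Nat) : Int) = ch - 2 * 28 - 56 * (k : Int) := by
          push_cast; ring
        simp only [h1, h2]

-- flattening uniform blocks into a single indexed range
theorem flatMap_blocks {alpha : Type} (P : Nat) (g : Nat → Nat → alpha) (hP : 0 < P) (m : Nat) :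
    (List.range m).flatMap (fun k => (List.range P).map (g k))
      = (List.range (m * P)).map (fun i => g (i / P) (i % P)) := by
  induction m with
  | zero => simp
  | succ m ih =>
    rw [List.range_succ, List.flatMap_append, ih, Nat.succ_mul, range_map_split]
    congr 1
    simp only [List.flatMap_cons, List.flatMap_nil, List.append_nil]
    apply List.map_congr_left
    intro j hj
    simp only [List.mem_range] at hj
    have h1 : (m * P + j) / P = m := by
      rw [Nat.mul_comm, Nat.mul_add_div hP, Nat.div_eq_of_lt hj]; omega
    have h2 : (m * P + j) % P = j := by
      rw [Nat.mul_comm, Nat.mul_add_mod, Nat.mod_eq_of_lt hj]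
    rw [h1, h2]

-- the alt's ring count equals the stream's ring count
theorem nrings_eq (cols rows : Int) :
    max 1 (PySem.Int.floordiv (min (cols * 28) (rows * 28) + 28 - 1) (2 * 28))
      = ((pvM (cols * 28) (rows * 28) : Nat) : Int) := by
  unfold pvM
  rw [PySem.Int.floordiv_eq_ediv_of_pos (by norm_num), PySem.Int.floordiv_eq_ediv_of_pos (by norm_num)]
  omega

-- B's closed-form point agrees with the stream, inside the rings …
theorem pointB_ring (cx cy rows cols : Int) (i : Nat)
    (hP : 0 < pvP rows cols) (hi : i < pvM (cols * 28) (rows * 28) * pvP rows cols) :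
    pvPointB cx cy rows cols (cols * 28) (rows * 28) (max cols 0) (max (rows - 1) 0)
      (2 * max cols 0 + 2 * max (rows - 1) 0)
      (max 1 (PySem.Int.floordiv (min (cols * 28) (rows * 28) + 28 - 1) (2 * 28))) (i : Int)
      = pvRingFun cx cy rows cols
          (cols * 28 - 56 * ((i / pvP rows cols : Nat) : Int))
          (rows * 28 - 56 * ((i / pvP rows cols : Nat) : Int))
          (i % pvP rows cols) := by
  have hper : (2 * max cols 0 + 2 * max (rows - 1) 0) = ((pvP rows cols : Nat) : Int) := by
    unfold pvP pvC pvRm; push_cast; omega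
  rw [pvPointB, hper, nrings_eq]
  rw [if_neg (by
    simp only [not_or, not_le]
    exact ⟨by exact_mod_cast hP.ne', by exact_mod_cast hi⟩)]
  simp only [PySem.Int.floordiv_natCast, PySem.Int.mod_natCast]
  have hc : max cols 0 = ((pvC cols : Nat) : Int) := by unfold pvC; omega
  have hr : max (rows - 1) 0 = ((pvRm rows : Nat) : Int) := by unfold pvRm; omega
  rw [hc, hr]
  simp only [show (2 : Int) * 28 = 56 by norm_num]
  rw [pvRingFun]
  split_ifs with h1 h2 h3 h4 h5 h6 h7 h8 h9 h10 h11 h12 h13 h14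
  all_goals first
    | rfl
    | (exfalso; omega)

-- … and beyond them it is the centre
theorem pointB_centre (cx cy rows cols : Int) (i : Nat)
    (hi : pvP rows cols = 0 ∨ pvM (cols * 28) (rows * 28) * pvP rows cols ≤ i) :
    pvPointB cx cy rows cols (cols * 28) (rows * 28) (max cols 0) (max (rows - 1) 0)
      (2 * max cols 0 + 2 * max (rows - 1) 0)
      (max 1 (PySem.Int.floordiv (min (cols * 28) (rows * 28) + 28 - 1) (2 * 28))) (i : Int)
      = (cx, cy) := by
  have hper : (2 * max cols 0 + 2 * max (rows - 1) 0) = ((pvP rows cols : Nat) : Int) := by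
    unfold pvP pvC pvRm; push_cast; omega
  rw [pvPointB, hper, nrings_eq]
  rw [if_pos ?_]
  rcases hi with h | h
  · left; exact_mod_cast congrArg (Nat.cast : Nat → Int) h
  · right; exact_mod_cast h

-- ===== VERDICT (by name: the statement is the Claim_ definition above) =====
theorem perimeter_grid_layout_py_spec : Claim_equal_perimeter_grid_layout_py := by
  intro cx cy n rows cols _
  show perimeter_grid_layout_py cx cy n rows cols = perimeter_grid_layout_py_alt cx cy n rows cols
  rw [perimeter_grid_layout_py, perimeter_grid_layout_py_alt]
  by_cases hn : n ≤ 0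
  · -- nothing is requested: both sides are empty
    have h0 : n.toNat = 0 := by omega
    have hempty : ¬ ((((#[] : Array (Int × Int)).size : Int)) < n) := by simp; omega
    rw [pvRingLoopA, pvFillA, h0, pvRingLoopAF, if_neg hempty, pvFillAF,
      PySem.List.pyRange_one]
    have : (max n 0 - 0).toNat = 0 := by omega
    rw [this]
    simp
  have hsz : (((pvRingLoopA cx cy n rows cols #[] (cols * 28) (rows * 28)).size : Nat) : Int)
      ≤ n := by
    have := congrArg List.length
      (ringLoop_eq_take cx cy n rows cols #[] (cols * 28) (rows * 28) (by simp; omega))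
    simp only [Array.length_toList, List.length_take] at this
    omega
  rw [fillA_eq_pad]
  have hloop := ringLoop_eq_take cx cy n rows cols #[] (cols * 28) (rows * 28) (by simp; omega)
  simp only [List.nil_append] at hloop
  have hszlen : (pvRingLoopA cx cy n rows cols #[] (cols * 28) (rows * 28)).size
      = ((pvRingsS cx cy rows cols (cols * 28) (rows * 28)).take n.toNat).length := by
    rw [← hloop, Array.length_toList]
  rw [hloop, hszlen]
  -- the stream as a flatMap of closed-form rings
  have hS : pvRingsS cx cy rows cols (cols * 28) (rows * 28) =
      (List.range (pvM (cols * 28) (rows * 28))).flatMap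
        (fun (k : Nat) => (List.range (pvP rows cols)).map
          (pvRingFun cx cy rows cols (cols * 28 - 56 * (k : Int)) (rows * 28 - 56 * (k : Int)))) := by
    rw [pvRingsS, ringsSF_eq_flatMap cx cy rows cols _ (cols * 28) (rows * 28)
      (by push_cast; omega) (by omega)]
    apply List.flatMap_congr
    intro k _
    exact ringS_eq_map cx cy rows cols _ _
  -- the alt as a map of pvPointB over range n.toNat
  have hB : (PySem.List.pyRange 0 (max n 0) 1).map
      (pvPointB cx cy rows cols (cols * 28) (rows * 28) (max cols 0) (max (rows - 1) 0)
        (2 * max cols 0 + 2 * max (rows - 1) 0)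
        (max 1 (PySem.Int.floordiv (min (cols * 28) (rows * 28) + 28 - 1) (2 * 28)))) =
      (List.range n.toNat).map
        (fun (i : Nat) => pvPointB cx cy rows cols (cols * 28) (rows * 28) (max cols 0)
          (max (rows - 1) 0) (2 * max cols 0 + 2 * max (rows - 1) 0)
          (max 1 (PySem.Int.floordiv (min (cols * 28) (rows * 28) + 28 - 1) (2 * 28))) (i : Int)) := by
    rw [PySem.List.pyRange_one, List.map_map]
    have : (max n 0 - 0).toNat = n.toNat := by omega
    rw [this]
    apply List.map_congr_left
    intro k _
    simp [Function.comp]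
  rw [hS, hB]
  set M := pvM (cols * 28) (rows * 28) with hMdef
  by_cases hP0 : pvP rows cols = 0
  · -- no ring points at all: everything is the centre
    have hSnil : (List.range M).flatMap
        (fun (k : Nat) => (List.range (pvP rows cols)).map
          (pvRingFun cx cy rows cols (cols * 28 - 56 * (k : Int)) (rows * 28 - 56 * (k : Int)))) = [] := by
      simp [hP0]
    rw [hSnil]
    simp only [List.take_nil, List.nil_append, List.length_nil, Nat.sub_zero]
    rw [List.map_congr_left (fun i _ => pointB_centre cx cy rows cols i (Or.inl hP0))]
    simp [List.map_const']
  · have hP : 0 < pvP rows cols := Nat.pos_of_ne_zero hP0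
    rw [flatMap_blocks (pvP rows cols) _ hP M]
    set P := pvP rows cols with hPdef
    set L := M * P with hL
    set m := min n.toNat L with hm
    have hmn : m ≤ n.toNat := by omega
    have hsplit : n.toNat = m + (n.toNat - m) := by omega
    rw [← List.map_take, List.take_range, hsplit, range_map_split]
    have hmin : min (m + (n.toNat - m)) L = m := by omega
    rw [hmin]
    congr 1
    · -- the truncated ring segment
      apply List.map_congr_left
      intro i hi
      simp only [List.mem_range] at hi
      exact (pointB_ring cx cy rows cols i hP (by rw [← hMdef, ← hPdef]; omega)).symm
    · -- the centre padding
      simp only [List.length_map, List.length_range]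
      have hcount : m + (n.toNat - m) - m = n.toNat - m := by omega
      rw [hcount]
      rw [List.map_congr_left (fun k hk => pointB_centre cx cy rows cols (m + k)
        (Or.inr (by simp only [List.mem_range] at hk; rw [← hMdef, ← hPdef]; omega)))]
      simp [List.map_const']
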